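-- pv_equiv track=rewrite | github.com/Dr0x3525/Proyecto-final-programacion | ejercicios_parcial_1/ejercicio4.py | recortar_lista
-- ===== SOURCE A (Python) =====
-- def recortar_lista(lista,buscar_dato):
--     b1 = 0
--     lista_nueva = []
--     for i in lista:
--         if b1 == 1:
--             lista_nueva.append(i)
--         if i == buscar_dato:
--             b1 = 1
--
--
--     return lista_nueva
-- ===== SOURCE B (Python) =====
-- def recortar_lista(lista, buscar_dato):
--     try:
--         idx = lista.index(buscar_dato)
--     except ValueError:
--         return []
--     return lista[idx + 1:]
-- ===== Notes on version B (the rewrite author's own statement) =====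
-- stated objective: simpler
-- what changed: Replaces the boolean-flag scan that appends element by element with a single index() lookup of the first occurrence followed by one slice of the tail; absence is handled by catching ValueError.
import Mathlib
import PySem

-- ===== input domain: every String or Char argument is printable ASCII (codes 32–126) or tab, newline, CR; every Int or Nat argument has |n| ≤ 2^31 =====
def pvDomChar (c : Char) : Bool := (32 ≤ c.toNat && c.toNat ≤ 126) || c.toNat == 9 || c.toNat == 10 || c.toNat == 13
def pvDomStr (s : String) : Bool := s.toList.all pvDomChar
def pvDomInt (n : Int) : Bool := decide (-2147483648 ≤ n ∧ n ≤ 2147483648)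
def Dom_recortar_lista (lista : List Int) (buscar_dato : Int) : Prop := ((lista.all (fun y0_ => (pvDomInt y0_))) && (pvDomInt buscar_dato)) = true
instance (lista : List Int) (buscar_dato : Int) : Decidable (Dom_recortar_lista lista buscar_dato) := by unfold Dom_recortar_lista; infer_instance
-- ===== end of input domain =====

-- B replaces A's boolean-flag scan by locating the first occurrence (index) and slicing the tail; simpler decomposition, same cost.

-- ===== PORT A =====
-- flag b1 (0/1) and accumulator, exactly A's loop order: append first, then set the flag
def recortar_lista (lista : List Int) (buscar_dato : Int) : List Int :=
  (lista.foldl (fun (st : Int × List Int) i =>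
      let lista_nueva := if st.1 == 1 then st.2 ++ [i] else st.2
      let b1 := if i == buscar_dato then 1 else st.1
      (b1, lista_nueva)) (0, [])).2

-- ===== PORT B =====
def recortar_lista_alt (lista : List Int) (buscar_dato : Int) : List Int :=
  match PySem.List.index? lista buscar_dato with
  | none => []                                            -- ValueError: value absent
  | some idx => PySem.List.slice lista (some ((idx : Int) + 1)) none   -- lista[idx+1:]

-- ===== PRECONDITION & SPEC =====
def Spec_recortar_lista (lista : List Int) (buscar_dato : Int) (out : List Int) : Prop := out = recortar_lista_alt lista buscar_dato
instance (lista : List Int) (buscar_dato : Int) (out : List Int) : Decidable (Spec_recortar_lista lista buscar_dato out) := by unfold Spec_recortar_lista; infer_instance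

-- ===== CLAIM (what is proved, stated in full; the proofs are below) =====
def Claim_equal_recortar_lista : Prop := ∀ (lista : List Int) (buscar_dato : Int), Dom_recortar_lista lista buscar_dato → Spec_recortar_lista lista buscar_dato (recortar_lista lista buscar_dato)

-- ===== LEMMAS AND PROOFS =====

-- once the flag is 1 it stays 1 and every remaining element is appended
theorem recortar_loop_one (buscar_dato : Int) (l acc : List Int) :
    (l.foldl (fun (st : Int × List Int) i =>
      let lista_nueva := if st.1 == 1 then st.2 ++ [i] else st.2
      let b1 := if i == buscar_dato then 1 else st.1
      (b1, lista_nueva)) (1, acc)).2 = acc ++ l := by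
  induction l generalizing acc with
  | nil => simp
  | cons x xs ih =>
    simp only [List.foldl]
    have h := ih (acc ++ [x])
    simp only [beq_iff_eq] at h ⊢
    simp [h]

theorem recortar_cons_ne (buscar_dato x : Int) (xs : List Int) (hx : x ≠ buscar_dato) :
    recortar_lista (x :: xs) buscar_dato = recortar_lista xs buscar_dato := by
  simp [recortar_lista, List.foldl, hx]

theorem recortar_lista_spec_aux (lista : List Int) (buscar_dato : Int) :
    recortar_lista lista buscar_dato = recortar_lista_alt lista buscar_dato := by
  induction lista with
  | nil => simp [recortar_lista, recortar_lista_alt, PySem.List.index?]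
  | cons x xs ih =>
    by_cases hx : x = buscar_dato
    · subst hx
      have hA : recortar_lista (x :: xs) x = xs := by
        simpa [recortar_lista, List.foldl] using recortar_loop_one x xs []
      have hB : recortar_lista_alt (x :: xs) x = xs := by
        have hidx : PySem.List.index? (x :: xs) x = some 0 := PySem.List.index?_cons_self x xs
        simp only [PySem.List.index?_eq_idxOf?] at hidx
        simp only [recortar_lista_alt, PySem.List.index?_eq_idxOf?, hidx]
        have : PySem.List.slice (x :: xs) (some ((0 : Nat) + (1 : Nat) : Int)) none = (x :: xs).drop 1 := by
          exact_mod_cast PySem.List.slice_from_natCast (x :: xs) 1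
        simpa using this
      rw [hA, hB]
    · rw [recortar_cons_ne buscar_dato x xs hx, ih]
      have hidx := PySem.List.index?_cons_of_ne xs hx
      simp only [PySem.List.index?_eq_idxOf?] at hidx
      cases hk : List.idxOf? buscar_dato xs with
      | none => simp [recortar_lista_alt, PySem.List.index?_eq_idxOf?, hidx, hk]
      | some k =>
        simp only [recortar_lista_alt, PySem.List.index?_eq_idxOf?, hidx, hk, Option.map_some]
        have h1 : PySem.List.slice xs (some ((k : Nat) + (1 : Nat) : Int)) none = xs.drop (k + 1) := by
          exact_mod_cast PySem.List.slice_from_natCast xs (k + 1)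
        have h2 : PySem.List.slice (x :: xs) (some ((k + 1 : Nat) + (1 : Nat) : Int)) none = (x :: xs).drop (k + 1 + 1) := by
          exact_mod_cast PySem.List.slice_from_natCast (x :: xs) (k + 1 + 1)
        push_cast at h1 h2 ⊢
        rw [h1, h2]
        simp

-- ===== VERDICT (by name: the statement is the Claim_ definition above) =====
theorem recortar_lista_spec : Claim_equal_recortar_lista := by
  intro lista buscar_dato _
  unfold Spec_recortar_lista
  exact recortar_lista_spec_aux lista buscar_dato
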